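-- pv_equiv track=rewrite | github.com/Venkat-jaswanth/Leetcode_solving | General_Leetcode/problems/SUBARRAY PROBLEMS/MaxSubArrLength.py | maxSubsetLen
-- ===== SOURCE A (Python) =====
-- def maxSubsetLen(A, N, K):
--     """
--     Finds the length of the longest subset (non-contiguous subarray) with sum equal to K.
--
--     :param A: List[int] - The input array of integers.
--     :param N: int - The size of the array.
--     :param K: int - The target sum.
--     :return: int - The length of the longest subset with sum K.
--     """
--     from itertools import combinations
--
--     max_len = 0
--
--     # Generate all subsets of the array
--     for i in range(1, N + 1):  # Length of subsets
--         for subset in combinations(A, i):  # Generate subsets of size i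
--             if sum(subset) == K:
--                 max_len = max(max_len, len(subset))
--
--     return max_len
-- ===== SOURCE B (Python) =====
-- def maxSubsetLen(A, N, K):
--     # Subset-sum DP (alternative algorithm): one pass over A maintaining the set of reachable
--     # (sum, size) pairs, then take the best size for sum K with 1 <= size <= N.
--     pairs = {(0, 0)}
--     for x in A:
--         pairs |= {(s + x, c + 1) for (s, c) in pairs}
--     return max((c for (s, c) in pairs if s == K and 1 <= c <= N), default=0)
-- ===== Notes on version B (the rewrite author's own statement) =====
-- stated objective: alternative
-- what changed: Replaces the enumeration of every combination of each size 1..N with a one-pass subset-sum DP maintaining the set of reachable (sum, count) pairs, then reads off the best count for sum K.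
import Mathlib
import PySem

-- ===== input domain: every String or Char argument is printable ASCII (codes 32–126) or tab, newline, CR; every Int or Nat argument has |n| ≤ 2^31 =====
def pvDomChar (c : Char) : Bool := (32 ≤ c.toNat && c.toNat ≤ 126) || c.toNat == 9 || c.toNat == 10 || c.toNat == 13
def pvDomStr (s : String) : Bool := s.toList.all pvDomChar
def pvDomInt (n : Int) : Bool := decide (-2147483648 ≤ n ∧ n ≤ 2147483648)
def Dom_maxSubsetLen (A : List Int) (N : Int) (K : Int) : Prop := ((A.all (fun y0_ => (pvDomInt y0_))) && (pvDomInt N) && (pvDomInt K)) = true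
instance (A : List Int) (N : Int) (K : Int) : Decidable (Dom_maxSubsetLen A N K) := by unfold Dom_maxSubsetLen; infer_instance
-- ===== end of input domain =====

-- B replaces A's enumeration of all combinations of each size with a one-pass
-- subset-sum DP over the set of reachable (sum, count) pairs (objective: alternative algorithm).

-- ===== PORT A =====
def maxSubsetLen (A : List Int) (N : Int) (K : Int) : Int :=
  (PySem.List.pyRange 1 (N + 1) 1).foldl (fun maxLen i =>
    (PySem.List.combinations A i.toNat).foldl (fun maxLen subset =>
      if subset.sum = K then max maxLen (subset.length : Int) else maxLen) maxLen) 0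

-- ===== PORT B =====
def maxSubsetLen_alt (A : List Int) (N : Int) (K : Int) : Int :=
  let pairs : PySem.Set (Int × Int) :=
    A.foldl (fun P x => PySem.Set.update P (P.map (fun p => (p.1 + x, p.2 + 1))))
      (PySem.Set.ofList [((0 : Int), (0 : Int))])
  pairs.foldl (fun m p => if p.1 = K ∧ 1 ≤ p.2 ∧ p.2 ≤ N then max m p.2 else m) 0

-- ===== PRECONDITION & SPEC =====
def Spec_maxSubsetLen (A : List Int) (N : Int) (K : Int) (out : Int) : Prop := out = maxSubsetLen_alt A N K
instance (A : List Int) (N : Int) (K : Int) (out : Int) : Decidable (Spec_maxSubsetLen A N K out) := by unfold Spec_maxSubsetLen; infer_instance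

-- ===== CLAIM (what is proved, stated in full; the proofs are below) =====
def Claim_equal_maxSubsetLen : Prop := ∀ (A : List Int) (N : Int) (K : Int), Dom_maxSubsetLen A N K → Spec_maxSubsetLen A N K (maxSubsetLen A N K)

-- ===== LEMMAS AND PROOFS =====

-- Generic "selective running max" fold and its characterisation.
def selMax {α : Type} (C : α → Prop) [DecidablePred C] (v : α → Int) (L : List α) (m0 : Int) : Int :=
  L.foldl (fun m a => if C a then max m (v a) else m) m0

theorem selMax_ge {α : Type} (C : α → Prop) [DecidablePred C] (v : α → Int) (L : List α) (m0 : Int) :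
    m0 ≤ selMax C v L m0 := by
  induction L generalizing m0 with
  | nil => simp [selMax]
  | cons a t ih =>
    simp only [selMax, List.foldl_cons]
    split_ifs
    · exact le_trans (le_max_left _ _) (ih _)
    · exact ih _

theorem selMax_bound {α : Type} (C : α → Prop) [DecidablePred C] (v : α → Int) (L : List α) (m0 : Int) :
    ∀ a ∈ L, C a → v a ≤ selMax C v L m0 := by
  induction L generalizing m0 with
  | nil => simp
  | cons b t ih =>
    intro a ha hC
    simp only [List.mem_cons] at ha
    simp only [selMax, List.foldl_cons]
    rcases ha with rfl | ha
    · simp only [if_pos hC]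
      exact le_trans (le_max_right _ _) (selMax_ge C v t _)
    · split_ifs <;> exact ih _ a ha hC

theorem selMax_cases {α : Type} (C : α → Prop) [DecidablePred C] (v : α → Int) (L : List α) (m0 : Int) :
    selMax C v L m0 = m0 ∨ ∃ a ∈ L, C a ∧ selMax C v L m0 = v a := by
  induction L generalizing m0 with
  | nil => left; simp [selMax]
  | cons b t ih =>
    simp only [selMax, List.foldl_cons]
    split_ifs with h
    · rcases ih (max m0 (v b)) with h1 | ⟨a, ha, hC, he⟩
      · rcases max_cases m0 (v b) with ⟨he2, _⟩ | ⟨he2, _⟩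
        · left; rw [selMax] at h1; omega
        · right; exact ⟨b, List.mem_cons_self, h, by rw [selMax] at h1; omega⟩
      · right; exact ⟨a, List.mem_cons_of_mem _ ha, hC, he⟩
    · rcases ih m0 with h1 | ⟨a, ha, hC, he⟩
      · left; exact h1
      · right; exact ⟨a, List.mem_cons_of_mem _ ha, hC, he⟩

theorem selMax_eq_selMax {α β : Type} (C1 : α → Prop) [DecidablePred C1] (C2 : β → Prop) [DecidablePred C2]
    (v1 : α → Int) (v2 : β → Int) (L1 : List α) (L2 : List β)
    (h : ∀ x : Int, (∃ a ∈ L1, C1 a ∧ v1 a = x) ↔ (∃ b ∈ L2, C2 b ∧ v2 b = x)) :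
    selMax C1 v1 L1 0 = selMax C2 v2 L2 0 := by
  apply le_antisymm
  · rcases selMax_cases C1 v1 L1 0 with h1 | ⟨a, ha, hC, he⟩
    · rw [h1]; exact selMax_ge C2 v2 L2 0
    · rw [he]
      obtain ⟨b, hb, hC2, hv⟩ := (h (v1 a)).1 ⟨a, ha, hC, rfl⟩
      rw [← hv]; exact selMax_bound C2 v2 L2 0 b hb hC2
  · rcases selMax_cases C2 v2 L2 0 with h1 | ⟨b, hb, hC, he⟩
    · rw [h1]; exact selMax_ge C1 v1 L1 0
    · rw [he]
      obtain ⟨a, ha, hC1, hv⟩ := (h (v2 b)).2 ⟨b, hb, hC, rfl⟩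
      rw [← hv]; exact selMax_bound C1 v1 L1 0 a ha hC1

-- Folding the inner loop over each combinations list equals one fold over the flattened list.
theorem foldl_flatMap_eq {α β γ : Type} (f : α → List β) (g : γ → β → γ) :
    ∀ (L : List α) (m0 : γ), L.foldl (fun m i => (f i).foldl g m) m0 = (L.flatMap f).foldl g m0 := by
  intro L
  induction L with
  | nil => intro m0; simp
  | cons a t ih => intro m0; simp [List.foldl_append, ih]

theorem maxSubsetLen_eq_selMax (A : List Int) (N K : Int) :
    maxSubsetLen A N K =
      selMax (fun l => l.sum = K) (fun l => (l.length : Int))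
        ((PySem.List.pyRange 1 (N + 1) 1).flatMap (fun i => PySem.List.combinations A i.toNat)) 0 := by
  rw [maxSubsetLen, selMax, ← foldl_flatMap_eq]

theorem maxSubsetLen_alt_eq_selMax (A : List Int) (N K : Int) :
    maxSubsetLen_alt A N K =
      selMax (fun p : Int × Int => p.1 = K ∧ 1 ≤ p.2 ∧ p.2 ≤ N) (fun p => p.2)
        (A.foldl (fun P x => PySem.Set.update P (P.map (fun p => (p.1 + x, p.2 + 1))))
          (PySem.Set.ofList [((0 : Int), (0 : Int))])) 0 := rfl

-- Membership in B's DP fold, with a general starting set P.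
theorem mem_pairs_fold (xs : List Int) :
    ∀ (P : List (Int × Int)) (z : Int × Int),
    (z ∈ xs.foldl (fun P x => PySem.Set.update P (P.map (fun p => (p.1 + x, p.2 + 1)))) P ↔
      ∃ l : List Int, l.Sublist xs ∧ ∃ q ∈ P, z = (q.1 + l.sum, q.2 + (l.length : Int))) := by
  induction xs with
  | nil =>
    intro P z
    simp only [List.foldl_nil, List.sublist_nil]
    constructor
    · intro hz; exact ⟨[], rfl, z, hz, by simp⟩
    · rintro ⟨l, rfl, q, hq, rfl⟩; simpa using hq
  | cons x t ih =>
    intro P z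
    simp only [List.foldl_cons]
    rw [ih]
    constructor
    · rintro ⟨l, hl, q, hq, rfl⟩
      rw [PySem.Set.mem_update ..] at hq
      rcases hq with hq | hq
      · exact ⟨l, hl.cons x, q, hq, rfl⟩
      · rcases List.mem_map.1 hq with ⟨q', hq', rfl⟩
        refine ⟨x :: l, (List.sublist_cons_iff).2 (Or.inr ⟨l, rfl, hl⟩), q', hq', ?_⟩
        simp only [List.sum_cons, List.length_cons]
        simp only [Prod.mk.injEq]; constructor <;> push_cast <;> ring
    · rintro ⟨l, hl, q, hq, rfl⟩
      rcases (List.sublist_cons_iff).1 hl with hl' | ⟨r, rfl, hr⟩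
      · exact ⟨l, hl', q, (PySem.Set.mem_update ..).2 (Or.inl hq), rfl⟩
      · refine ⟨r, hr, (q.1 + x, q.2 + 1), (PySem.Set.mem_update ..).2 (Or.inr (List.mem_map.2 ⟨q, hq, rfl⟩)), ?_⟩
        simp only [List.sum_cons, List.length_cons]
        simp only [Prod.mk.injEq]; constructor <;> push_cast <;> ring

theorem mem_pairs (A : List Int) (z : Int × Int) :
    (z ∈ A.foldl (fun P x => PySem.Set.update P (P.map (fun p => (p.1 + x, p.2 + 1))))
        (PySem.Set.ofList [((0 : Int), (0 : Int))]) ↔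
      ∃ l : List Int, l.Sublist A ∧ z = (l.sum, (l.length : Int))) := by
  rw [mem_pairs_fold]
  constructor
  · rintro ⟨l, hl, q, hq, rfl⟩
    have : q = ((0 : Int), (0 : Int)) := by simpa [PySem.Set.mem_ofList] using hq
    subst this
    exact ⟨l, hl, by simp⟩
  · rintro ⟨l, hl, rfl⟩
    exact ⟨l, hl, ((0 : Int), (0 : Int)), by simp [PySem.Set.mem_ofList], by simp⟩

-- The two qualifying value sets coincide: lengths of sublists of A with sum K and 1 ≤ length ≤ N.
theorem values_iff (A : List Int) (N K x : Int) :
    (∃ a ∈ (PySem.List.pyRange 1 (N + 1) 1).flatMap (fun i => PySem.List.combinations A i.toNat),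
        a.sum = K ∧ (a.length : Int) = x) ↔
    (∃ p ∈ A.foldl (fun P x => PySem.Set.update P (P.map (fun p => (p.1 + x, p.2 + 1))))
          (PySem.Set.ofList [((0 : Int), (0 : Int))]),
        (p.1 = K ∧ 1 ≤ p.2 ∧ p.2 ≤ N) ∧ p.2 = x) := by
  constructor
  · rintro ⟨l, hl, hsum, rfl⟩
    rcases List.mem_flatMap.1 hl with ⟨i, hi, hli⟩
    rcases (PySem.List.mem_combinations_iff ..).1 hli with ⟨hsub, hlen⟩
    rcases PySem.List.mem_pyRange_one.1 hi with ⟨h1, h2⟩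
    have hlen' : (l.length : Int) = i := by omega
    refine ⟨(l.sum, (l.length : Int)), (mem_pairs A _).2 ⟨l, hsub, rfl⟩, ⟨hsum, ?_, ?_⟩, rfl⟩ <;> omega
  · rintro ⟨p, hp, ⟨hK, h1, h2⟩, rfl⟩
    rcases (mem_pairs A p).1 hp with ⟨l, hsub, rfl⟩
    simp only at hK h1 h2 ⊢
    refine ⟨l, List.mem_flatMap.2 ⟨(l.length : Int), PySem.List.mem_pyRange_one.2 ⟨h1, by omega⟩, ?_⟩, hK, rfl⟩
    exact (PySem.List.mem_combinations_iff ..).2 ⟨hsub, by omega⟩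

-- ===== VERDICT (by name: the statement is the Claim_ definition above) =====
theorem maxSubsetLen_spec : Claim_equal_maxSubsetLen := by
  intro A N K _
  unfold Spec_maxSubsetLen
  rw [maxSubsetLen_eq_selMax, maxSubsetLen_alt_eq_selMax]
  exact selMax_eq_selMax _ _ _ _ _ _ (fun x => values_iff A N K x)
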